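-- pv_equiv track=rewrite | github.com/linzeyang/leetcode-solutions | medium/1806.py | reinitializePermutation
-- ===== SOURCE A (Python) =====
-- def reinitializePermutation(n: int) -> int:
--     lis = list(range(n))
--     new = lis[:]
--
--     count = 0
--
--     while True:
--         new = [
--             new[i // 2] if i % 2 == 0 else new[n // 2 + (i - 1) // 2]
--             for i in range(n)
--         ]
--         count += 1
--
--         if new[1] == 1:
--             break
--
--     return count
-- ===== SOURCE B (Python) =====
-- def reinitializePermutation(n: int) -> int:
--     # Track only the index holding value 1; A's update new[i] = old[perm(i)]
--     # means the value at index 1 after k steps is perm^k(1), so iterate perm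
--     # on a single position until it returns to 1.  O(steps) vs A's O(n*steps).
--     count = 0
--     pos = 1
--     while True:
--         pos = pos // 2 if pos % 2 == 0 else n // 2 + (pos - 1) // 2
--         count += 1
--         if pos == 1:
--             return count
-- ===== Notes on version B (the rewrite author's own statement) =====
-- stated objective: faster
-- what changed: B tracks only the single index that holds the value 1 and iterates the index map on it, instead of rebuilding the whole n-element list on every step.
-- outside the precondition, e.g. on reinitializePermutation(1): A raises IndexError, B does not finish within the time limit
import Mathlib
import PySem

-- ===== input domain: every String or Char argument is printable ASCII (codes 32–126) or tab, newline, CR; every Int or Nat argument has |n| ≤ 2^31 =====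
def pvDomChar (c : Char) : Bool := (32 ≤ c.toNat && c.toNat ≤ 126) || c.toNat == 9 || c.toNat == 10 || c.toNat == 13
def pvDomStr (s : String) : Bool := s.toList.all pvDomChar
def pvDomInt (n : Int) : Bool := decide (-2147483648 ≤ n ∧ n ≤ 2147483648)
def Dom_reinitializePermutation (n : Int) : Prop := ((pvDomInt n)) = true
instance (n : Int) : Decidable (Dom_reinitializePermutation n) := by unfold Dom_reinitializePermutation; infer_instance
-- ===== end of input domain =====

-- B replaces A's per-step rebuilding of the whole n-element list by iterating the
-- index map on the single position holding the value 1 (objective: faster).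

-- ===== PORT A =====
-- one step of A's list comprehension (the Python list is held as an Array for
-- Python's O(1) indexing; .toNat is exact here: inside Pre_ every index is ≥ 0)
def pvStepA (n : Int) (new : Array Int) : Array Int :=
  ((PySem.List.pyRange 0 n 1).map (fun i =>
    if PySem.Int.mod i 2 = 0 then new.getD (PySem.Int.floordiv i 2).toNat 0
    else new.getD (PySem.Int.floordiv n 2 + PySem.Int.floordiv (i - 1) 2).toNat 0)).toArray

-- A's 'while True' loop; fueled (fuel n.toNat suffices on Pre_: the loop exits
-- after fewer than n iterations)
def pvLoopA (n : Int) : Nat → Array Int → Int → Int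
  | 0, _, count => count
  | fuel+1, new, count =>
    let new' := pvStepA n new
    let count' := count + 1
    if new'.getD 1 0 = 1 then count' else pvLoopA n fuel new' count'

def reinitializePermutation (n : Int) : Int :=
  let lis := PySem.List.pyRange 0 n 1
  let new := (PySem.List.slice lis none none).toArray
  pvLoopA n n.toNat new 0

-- ===== PORT B =====
-- B's 'while True' loop over the single tracked position; same fuel choice
def pvLoopB (n : Int) : Nat → Int → Int → Int
  | 0, _, count => count
  | fuel+1, pos, count =>
    let pos' := if PySem.Int.mod pos 2 = 0 then PySem.Int.floordiv pos 2
                else PySem.Int.floordiv n 2 + PySem.Int.floordiv (pos - 1) 2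
    let count' := count + 1
    if pos' = 1 then count' else pvLoopB n fuel pos' count'

def reinitializePermutation_alt (n : Int) : Int :=
  pvLoopB n n.toNat 1 0

-- ===== PRECONDITION & SPEC =====
-- Pre_ excludes n < 2, where A raises IndexError (new[1] on a list of length < 2).
def Pre_reinitializePermutation (n : Int) : Prop := 2 ≤ n
instance (n : Int) : Decidable (Pre_reinitializePermutation n) := by unfold Pre_reinitializePermutation; infer_instance
def pvWitness_reinitializePermutation : Int := 2

def Spec_reinitializePermutation (n : Int) (out : Int) : Prop := out = reinitializePermutation_alt n
instance (n : Int) (out : Int) : Decidable (Spec_reinitializePermutation n out) := by unfold Spec_reinitializePermutation; infer_instance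

-- ===== CLAIM (what is proved, stated in full; the proofs are below) =====
def Claim_equal_reinitializePermutation : Prop := ∀ (n : Int), Dom_reinitializePermutation n → Pre_reinitializePermutation n → Spec_reinitializePermutation n (reinitializePermutation n)

-- ===== LEMMAS AND PROOFS =====

-- the index map both programs apply: new[i] = old[pvPerm n i]
def pvPerm (n i : Int) : Int :=
  if PySem.Int.mod i 2 = 0 then PySem.Int.floordiv i 2
  else PySem.Int.floordiv n 2 + PySem.Int.floordiv (i - 1) 2

lemma pvPerm_range (n i : Int) (hn : 2 ≤ n) (h0 : 0 ≤ i) (h1 : i < n) :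
    0 ≤ pvPerm n i ∧ pvPerm n i < n := by
  unfold pvPerm
  rw [PySem.Int.mod_eq_emod_of_pos (by omega : (0:Int) < 2),
      PySem.Int.floordiv_eq_ediv_of_pos (by omega : (0:Int) < 2),
      PySem.Int.floordiv_eq_ediv_of_pos (by omega : (0:Int) < 2),
      PySem.Int.floordiv_eq_ediv_of_pos (by omega : (0:Int) < 2)]
  split_ifs with h <;> omega

lemma pvGetD_toArray (l : List Int) (j : Nat) (d : Int) :
    l.toArray.getD j d = l.getD j d := by
  by_cases h : j < l.length
  · simp [Array.getD, h, List.getD_eq_getElem?_getD]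
  · simp [Array.getD, h, List.getD_eq_getElem?_getD]

lemma pvArrMapRange (f : Int → Int) (n i : Int) (h0 : 0 ≤ i) (h1 : i < n) :
    (((PySem.List.pyRange 0 n 1).map f).toArray).getD i.toNat 0 = f i := by
  have hc : ((i.toNat : Nat) : Int) = i := Int.toNat_of_nonneg h0
  rw [pvGetD_toArray, ← PySem.List.pyGetD_natCast, hc]
  exact PySem.List.pyGetD_map_pyRange_of_nonneg f n i 0 h0 h1

lemma pvStepA_map (n : Int) (hn : 2 ≤ n) (f : Int → Int) :
    pvStepA n (((PySem.List.pyRange 0 n 1).map f).toArray)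
      = ((PySem.List.pyRange 0 n 1).map (fun i => f (pvPerm n i))).toArray := by
  unfold pvStepA
  congr 1
  apply List.map_congr_left
  intro i hi
  rw [PySem.List.mem_pyRange_one] at hi
  by_cases h : PySem.Int.mod i 2 = 0
  · have hb := pvPerm_range n i hn hi.1 hi.2
    simp only [pvPerm, h, if_true] at hb ⊢
    exact pvArrMapRange f n _ hb.1 hb.2
  · have hb := pvPerm_range n i hn hi.1 hi.2
    simp only [pvPerm, h, if_false] at hb ⊢
    exact pvArrMapRange f n _ hb.1 hb.2

lemma pvLoop_eq (n : Int) (hn : 2 ≤ n) :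
    ∀ (fuel k : Nat) (c : Int),
      pvLoopA n fuel (((PySem.List.pyRange 0 n 1).map ((pvPerm n)^[k])).toArray) c
        = pvLoopB n fuel ((pvPerm n)^[k] 1) c := by
  intro fuel
  induction fuel with
  | zero => intro k c; rfl
  | succ m ih =>
    intro k c
    have hstep : pvStepA n (((PySem.List.pyRange 0 n 1).map ((pvPerm n)^[k])).toArray)
        = ((PySem.List.pyRange 0 n 1).map ((pvPerm n)^[k+1])).toArray := by
      rw [pvStepA_map n hn]
      exact congrArg List.toArray
        (List.map_congr_left (fun i _ => (Function.iterate_succ_apply (pvPerm n) k i).symm))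
    have hget : (((PySem.List.pyRange 0 n 1).map ((pvPerm n)^[k+1])).toArray).getD (1:Int).toNat 0
        = (pvPerm n)^[k+1] 1 :=
      pvArrMapRange _ n 1 (by omega) (by omega)
    have hpos : (if PySem.Int.mod ((pvPerm n)^[k] 1) 2 = 0
                  then PySem.Int.floordiv ((pvPerm n)^[k] 1) 2
                  else PySem.Int.floordiv n 2 + PySem.Int.floordiv ((pvPerm n)^[k] 1 - 1) 2)
        = (pvPerm n)^[k+1] 1 := by
      rw [Function.iterate_succ_apply' (pvPerm n) k 1]
      rfl
    show (if (pvStepA n (((PySem.List.pyRange 0 n 1).map ((pvPerm n)^[k])).toArray)).getD 1 0 = 1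
          then c + 1
          else pvLoopA n m (pvStepA n (((PySem.List.pyRange 0 n 1).map ((pvPerm n)^[k])).toArray)) (c + 1))
        = (if (if PySem.Int.mod ((pvPerm n)^[k] 1) 2 = 0
                  then PySem.Int.floordiv ((pvPerm n)^[k] 1) 2
                  else PySem.Int.floordiv n 2 + PySem.Int.floordiv ((pvPerm n)^[k] 1 - 1) 2) = 1
              then c + 1
              else pvLoopB n m (if PySem.Int.mod ((pvPerm n)^[k] 1) 2 = 0
                  then PySem.Int.floordiv ((pvPerm n)^[k] 1) 2
                  else PySem.Int.floordiv n 2 + PySem.Int.floordiv ((pvPerm n)^[k] 1 - 1) 2) (c + 1))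
    rw [hstep, hpos]
    have hget' : (((PySem.List.pyRange 0 n 1).map ((pvPerm n)^[k+1])).toArray).getD 1 0
        = (pvPerm n)^[k+1] 1 := hget
    rw [hget']
    by_cases hc : (pvPerm n)^[k+1] 1 = 1
    · simp [hc]
    · simp only [if_neg hc]
      exact ih (k+1) (c+1)

-- ===== VERDICT (by name: the statement is the Claim_ definition above) =====
theorem reinitializePermutation_spec : Claim_equal_reinitializePermutation := by
  intro n _ hn
  unfold Spec_reinitializePermutation reinitializePermutation reinitializePermutation_alt
  simp only [PySem.List.slice_none_none]
  have h := pvLoop_eq n hn n.toNat 0 0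
  simpa using h
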